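-- pv_equiv track=rewrite | github.com/nathandebeech/Nathan | homework3/homework3.py | average_vowels
-- ===== SOURCE A (Python) =====
-- def average_vowels(paragraph):
--     period = ["."]
--     total_sentences = 0
--     for character in paragraph:
--         if character in period:
--             total_sentences +=1
--     total_vowels = 0
--     vowels = ["a", "e", "i", "o", "u", "y"]    # Why is sometimes vowel, so I placed it here
--     for letter in paragraph:
--         if letter in vowels:
--             total_vowels += 1
--     average = total_vowels // total_sentences
--     return average
-- ===== SOURCE B (Python) =====
-- def average_vowels(paragraph):
--     counts = {}
--     for ch in paragraph:
--         counts[ch] = counts.get(ch, 0) + 1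
--     total_vowels = sum(counts.get(v, 0) for v in "aeiouy")
--     return total_vowels // counts.get(".", 0)
-- ===== Notes on version B (the rewrite author's own statement) =====
-- stated objective: alternative
-- what changed: Replaces A's two membership-scanning loops over the paragraph with one histogram-building pass over the paragraph followed by seven constant-time dictionary lookups (six vowels and the period), preserving integer floor division and the ZeroDivisionError on paragraphs without a period.
import Mathlib
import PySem

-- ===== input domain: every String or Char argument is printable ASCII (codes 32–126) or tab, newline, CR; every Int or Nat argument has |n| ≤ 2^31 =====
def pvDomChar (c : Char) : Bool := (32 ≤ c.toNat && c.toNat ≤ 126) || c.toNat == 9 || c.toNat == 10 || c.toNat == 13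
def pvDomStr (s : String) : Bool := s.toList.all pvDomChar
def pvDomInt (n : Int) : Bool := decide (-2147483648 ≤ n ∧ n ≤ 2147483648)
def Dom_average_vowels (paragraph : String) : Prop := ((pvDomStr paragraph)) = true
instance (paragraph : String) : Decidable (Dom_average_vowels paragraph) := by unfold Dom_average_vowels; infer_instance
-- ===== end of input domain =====

-- B replaces A's two membership-scanning passes with one histogram-building pass plus constant lookups (alternative structure, same cost).

-- ===== PORT A =====
def average_vowels (paragraph : String) : Int :=
  let period : List Char := ['.']
  let total_sentences : Int :=
    paragraph.toList.foldl (fun acc character => if character ∈ period then acc + 1 else acc) 0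
  let vowels : List Char := ['a', 'e', 'i', 'o', 'u', 'y']
  let total_vowels : Int :=
    paragraph.toList.foldl (fun acc letter => if letter ∈ vowels then acc + 1 else acc) 0
  PySem.Int.floordiv total_vowels total_sentences

-- ===== PORT B =====
def average_vowels_alt (paragraph : String) : Int :=
  let counts : PySem.Dict Char Int :=
    paragraph.toList.foldl (fun d ch => d.insert ch (d.getD ch 0 + 1)) PySem.Dict.empty
  let total_vowels : Int := ("aeiouy".toList.map (fun v => counts.getD v 0)).sum
  PySem.Int.floordiv total_vowels (counts.getD '.' 0)

-- ===== PRECONDITION & SPEC =====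
-- Pre_ excludes exactly the paragraphs without a period, on which Python A raises ZeroDivisionError (B raises there too).
def Pre_average_vowels (paragraph : String) : Prop := '.' ∈ paragraph.toList
instance (paragraph : String) : Decidable (Pre_average_vowels paragraph) := by unfold Pre_average_vowels; infer_instance
def pvWitness_average_vowels : String := "Hi you."
def Spec_average_vowels (paragraph : String) (out : Int) : Prop := out = average_vowels_alt paragraph
instance (paragraph : String) (out : Int) : Decidable (Spec_average_vowels paragraph out) := by unfold Spec_average_vowels; infer_instance

-- ===== CLAIM (what is proved, stated in full; the proofs are below) =====
def Claim_equal_average_vowels : Prop := ∀ (paragraph : String), Dom_average_vowels paragraph → Pre_average_vowels paragraph → Spec_average_vowels paragraph (average_vowels paragraph)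

-- ===== LEMMAS AND PROOFS =====

-- a countP over a disjunction of disjoint tests splits into a sum
lemma countP_disj (p q : Char → Bool) (h : ∀ x, ¬(p x = true ∧ q x = true)) (l : List Char) :
    l.countP (fun x => p x || q x) = l.countP p + l.countP q := by
  induction l with
  | nil => simp
  | cons c l ih =>
    simp only [List.countP_cons]
    by_cases hp : p c
    · have hq : ¬ q c = true := fun hq => h c ⟨hp, hq⟩
      simp [hp, hq, ih]; omega
    · by_cases hq : q c
      · simp [hp, hq, ih]; omega
      · simp [hp, hq, ih]

-- summing the per-character counts of a Nodup list of characters equals one membership-counting pass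
lemma sum_count_eq_countP (vs : List Char) (hvs : vs.Nodup) (l : List Char) :
    (vs.map (fun v => l.count v)).sum = l.countP (fun c => decide (c ∈ vs)) := by
  induction vs with
  | nil => simp
  | cons v vs ih =>
    have hv : v ∉ vs := (List.nodup_cons.mp hvs).1
    have hn : vs.Nodup := (List.nodup_cons.mp hvs).2
    have heq : (fun c => decide (c ∈ v :: vs)) = (fun c : Char => (c == v) || decide (c ∈ vs)) := by
      funext c
      by_cases hc : c = v <;> simp [hc, List.mem_cons]
    rw [heq, countP_disj _ _ (by rintro x ⟨h1, h2⟩; simp at h1 h2; exact hv (h1 ▸ h2)) l,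
      List.map_cons, List.sum_cons, ih hn, List.count]

-- the Int-valued form used by B's port
lemma sum_count_int (vs : List Char) (hvs : vs.Nodup) (l : List Char) :
    (vs.map (fun v => ((l.count v : Nat) : Int))).sum = ((l.countP (fun c => decide (c ∈ vs)) : Nat) : Int) := by
  rw [← sum_count_eq_countP vs hvs l]
  clear hvs
  induction vs with
  | nil => simp
  | cons v vs ih => simp only [List.map_cons, List.sum_cons, Nat.cast_add, ih]

-- B's histogram lookup is the plain count
lemma getD_hist (l : List Char) (v : Char) :
    (l.foldl (fun d ch => d.insert ch (d.getD ch 0 + 1)) (PySem.Dict.empty : PySem.Dict Char Int)).getD v 0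
      = (l.count v : Int) := by
  rw [PySem.Dict.getD_foldl_insert_add_one]
  simp [PySem.Dict.empty, PySem.Dict.getD, PySem.Dict.get?]

-- ===== VERDICT (by name: the statement is the Claim_ definition above) =====
theorem average_vowels_spec : Claim_equal_average_vowels := by
  intro paragraph _ _
  unfold Spec_average_vowels average_vowels average_vowels_alt
  simp only [PySem.List.foldl_ite_add_one, getD_hist, zero_add]
  congr 1
  · have h := sum_count_int ['a','e','i','o','u','y'] (by decide) paragraph.toList
    simpa using h.symm
  · have h := sum_count_int ['.'] (by decide) paragraph.toList
    simp only [List.map_cons, List.map_nil, List.sum_cons, List.sum_nil, add_zero] at h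
    simpa using h.symm
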